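-- pv_equiv track=rewrite | github.com/tousifo/MY-CODES | Anton_and_Polyhedrons.py | kaz
-- ===== SOURCE A (Python) =====
-- def kaz(n, listu):
--
--     dicu = {
--     "Tetrahedron" : 4,
--     "Cube" : 6,
--     "Octahedron" : 8,
--     "Dodecahedron" : 12,
--     "Icosahedron" : 20
--     }
--     count = 0
--     for i in listu:
--         if i in dicu.keys():
--             count += dicu[i]
--
--     return count
-- ===== SOURCE B (Python) =====
-- def kaz(n, listu):
--     return (4 * listu.count("Tetrahedron")
--             + 6 * listu.count("Cube")
--             + 8 * listu.count("Octahedron")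
--             + 12 * listu.count("Dodecahedron")
--             + 20 * listu.count("Icosahedron"))
-- ===== Notes on version B (the rewrite author's own statement) =====
-- stated objective: simpler
-- what changed: B drops the dict and the per-element membership loop entirely and returns a closed arithmetic expression of five list.count calls, one per named solid.
import Mathlib
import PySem

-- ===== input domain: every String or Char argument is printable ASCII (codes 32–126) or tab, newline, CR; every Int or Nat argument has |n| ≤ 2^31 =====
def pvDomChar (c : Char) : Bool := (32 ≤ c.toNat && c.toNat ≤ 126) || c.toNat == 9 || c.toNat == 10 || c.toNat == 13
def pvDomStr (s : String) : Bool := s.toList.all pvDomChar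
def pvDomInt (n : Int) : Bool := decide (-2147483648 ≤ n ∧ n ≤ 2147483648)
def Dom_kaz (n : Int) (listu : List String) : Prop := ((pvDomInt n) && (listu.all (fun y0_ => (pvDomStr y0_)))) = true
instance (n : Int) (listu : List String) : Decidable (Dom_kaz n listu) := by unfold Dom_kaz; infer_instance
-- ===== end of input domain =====

-- B replaces A's dict and membership-test loop by a closed arithmetic expression
-- of five list.count calls, one per named solid (simpler decomposition, same cost).

-- ===== PORT A =====
-- the dict literal 'dicu'
def kazDicu : PySem.Dict String Int :=
  PySem.Dict.ofList [("Tetrahedron", 4), ("Cube", 6), ("Octahedron", 8),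
                     ("Dodecahedron", 12), ("Icosahedron", 20)]

def kaz (n : Int) (listu : List String) : Int :=
  listu.foldl (fun count i =>
    if kazDicu.contains i then count + kazDicu.getD i 0 else count) 0

-- ===== PORT B =====
def kaz_alt (n : Int) (listu : List String) : Int :=
  4 * PySem.List.count listu "Tetrahedron"
  + 6 * PySem.List.count listu "Cube"
  + 8 * PySem.List.count listu "Octahedron"
  + 12 * PySem.List.count listu "Dodecahedron"
  + 20 * PySem.List.count listu "Icosahedron"

-- ===== PRECONDITION & SPEC =====
def Spec_kaz (n : Int) (listu : List String) (out : Int) : Prop := out = kaz_alt n listu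
instance (n : Int) (listu : List String) (out : Int) : Decidable (Spec_kaz n listu out) := by unfold Spec_kaz; infer_instance

-- ===== CLAIM (what is proved, stated in full; the proofs are below) =====
def Claim_equal_kaz : Prop := ∀ (n : Int) (listu : List String), Dom_kaz n listu → Spec_kaz n listu (kaz n listu)

-- ===== LEMMAS AND PROOFS =====

-- A's guarded step always adds kazDicu.getD i 0 (which is 0 when i is absent)
lemma kaz_step (c : Int) (i : String) :
    (if kazDicu.contains i then c + kazDicu.getD i 0 else c) = c + kazDicu.getD i 0 := by
  by_cases h : kazDicu.contains i = true
  · simp [h]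
  · have h0 : kazDicu.getD i 0 = 0 :=
      PySem.Dict.getD_of_not_contains _ _ (by simpa using h)
    simp [h, h0]

lemma kaz_foldl (l : List String) (acc : Int) :
    l.foldl (fun count i =>
      if kazDicu.contains i then count + kazDicu.getD i 0 else count) acc
      = acc + (l.map (fun i => kazDicu.getD i 0)).sum := by
  induction l generalizing acc with
  | nil => simp
  | cons x t ih =>
      rw [List.foldl_cons, kaz_step, ih]
      simp [add_assoc]

-- the per-element contribution, split by which key (if any) the element matches
lemma kaz_contrib (x : String) :
    kazDicu.getD x 0 =
      4 * (if x = "Tetrahedron" then 1 else 0) + 6 * (if x = "Cube" then 1 else 0)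
      + 8 * (if x = "Octahedron" then 1 else 0) + 12 * (if x = "Dodecahedron" then 1 else 0)
      + 20 * (if x = "Icosahedron" then 1 else 0) := by
  by_cases h1 : x = "Tetrahedron"
  · subst h1; decide
  by_cases h2 : x = "Cube"
  · subst h2; decide
  by_cases h3 : x = "Octahedron"
  · subst h3; decide
  by_cases h4 : x = "Dodecahedron"
  · subst h4; decide
  by_cases h5 : x = "Icosahedron"
  · subst h5; decide
  have hc : kazDicu.contains x = false := by
    rw [show kazDicu = PySem.Dict.mk
          [("Tetrahedron", 4), ("Cube", 6), ("Octahedron", 8),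
           ("Dodecahedron", 12), ("Icosahedron", 20)] from by decide,
        PySem.Dict.contains_mk]
    simp only [List.any_cons, List.any_nil, Bool.or_eq_false_iff, beq_eq_false_iff_ne, ne_eq]
    exact ⟨fun h => h1 h.symm, fun h => h2 h.symm, fun h => h3 h.symm,
      fun h => h4 h.symm, fun h => h5 h.symm, trivial⟩
  rw [PySem.Dict.getD_of_not_contains _ _ hc]
  simp [h1, h2, h3, h4, h5]

lemma kaz_mapsum (l : List String) :
    (l.map (fun i => kazDicu.getD i 0)).sum =
      4 * (l.count "Tetrahedron" : Int) + 6 * (l.count "Cube" : Int)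
      + 8 * (l.count "Octahedron" : Int) + 12 * (l.count "Dodecahedron" : Int)
      + 20 * (l.count "Icosahedron" : Int) := by
  induction l with
  | nil => simp
  | cons x t ih =>
      simp only [List.map_cons, List.sum_cons, ih, List.count_cons, kaz_contrib x]
      push_cast
      simp only [beq_iff_eq]
      split_ifs <;> push_cast <;> ring

-- ===== VERDICT (by name: the statement is the Claim_ definition above) =====
theorem kaz_spec : Claim_equal_kaz := by
  intro n listu _
  unfold Spec_kaz kaz kaz_alt
  rw [kaz_foldl, kaz_mapsum]
  simp [PySem.List.count_eq]
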